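-- pv_equiv track=rewrite | github.com/vecto-ai/vecto | tests/test_corpus.py | count_words_and_collect_prefix
-- ===== SOURCE A (Python) =====
-- def count_words_and_collect_prefix(corpus, max_len=10):
--     total_words = 0
--     words = []
--     for w in corpus:
--         if len(words) < max_len:
--             words.append(w)
--         total_words += 1
--     return total_words, words
-- ===== SOURCE B (Python) =====
-- def count_words_and_collect_prefix(corpus, max_len=10):
--     n = max(max_len, 0)
--     return len(corpus), list(corpus[:n])
-- ===== Notes on version B (the rewrite author's own statement) =====
-- stated objective: simpler
-- what changed: Replaces the fused counting loop with a per-element length test by two direct whole-list operations: len(corpus) for the count and a clamped slice corpus[:max(max_len,0)] for the prefix.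
import Mathlib
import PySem

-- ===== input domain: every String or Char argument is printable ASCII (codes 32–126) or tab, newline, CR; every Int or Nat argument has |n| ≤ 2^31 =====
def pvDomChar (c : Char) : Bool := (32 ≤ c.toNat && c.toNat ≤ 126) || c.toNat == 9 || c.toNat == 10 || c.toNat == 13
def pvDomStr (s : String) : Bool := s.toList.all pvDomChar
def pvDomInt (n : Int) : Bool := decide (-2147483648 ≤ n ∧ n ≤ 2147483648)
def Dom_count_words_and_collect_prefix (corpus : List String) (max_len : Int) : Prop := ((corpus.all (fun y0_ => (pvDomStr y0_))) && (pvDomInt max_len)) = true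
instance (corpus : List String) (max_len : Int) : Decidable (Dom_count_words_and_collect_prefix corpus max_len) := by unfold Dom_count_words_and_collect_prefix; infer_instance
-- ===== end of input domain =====

-- B replaces A's fused counting loop by len(corpus) plus a clamped prefix slice (simpler; return value only).

-- ===== PORT A =====
-- A: one fold over corpus carrying (total_words, words), appending while len(words) < max_len.
def count_words_and_collect_prefix (corpus : List String) (max_len : Int) : Int × List String :=
  corpus.foldl
    (fun (s : Int × List String) w =>
      (s.1 + 1, if (s.2.length : Int) < max_len then s.2 ++ [w] else s.2))
    (0, [])

-- ===== PORT B =====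
-- B: n = max(max_len, 0); (len(corpus), corpus[:n]).  Int.toNat is exactly max(·,0) into Nat,
-- and corpus[:n] for 0 ≤ n is List.take n.
def count_words_and_collect_prefix_alt (corpus : List String) (max_len : Int) : Int × List String :=
  ((corpus.length : Int), corpus.take max_len.toNat)

-- ===== PRECONDITION & SPEC =====
def Spec_count_words_and_collect_prefix (corpus : List String) (max_len : Int) (out : Int × List String) : Prop := out = count_words_and_collect_prefix_alt corpus max_len
instance (corpus : List String) (max_len : Int) (out : Int × List String) : Decidable (Spec_count_words_and_collect_prefix corpus max_len out) := by unfold Spec_count_words_and_collect_prefix; infer_instance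

-- ===== CLAIM (what is proved, stated in full; the proofs are below) =====
def Claim_equal_count_words_and_collect_prefix : Prop := ∀ (corpus : List String) (max_len : Int), Dom_count_words_and_collect_prefix corpus max_len → Spec_count_words_and_collect_prefix corpus max_len (count_words_and_collect_prefix corpus max_len)

-- ===== LEMMAS AND PROOFS =====

-- Invariant of A's loop: from state (t, ws) it adds the list length to t and
-- appends the next (max_len.toNat - ws.length) elements to ws.
theorem cwacp_loop_eq (m : Int) (corpus : List String) (t : Int) (ws : List String) :
    corpus.foldl
      (fun (s : Int × List String) w =>
        (s.1 + 1, if (s.2.length : Int) < m then s.2 ++ [w] else s.2))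
      (t, ws)
    = (t + (corpus.length : Int), ws ++ corpus.take (m.toNat - ws.length)) := by
  induction corpus generalizing t ws with
  | nil => simp
  | cons w rest ih =>
    simp only [List.foldl_cons]
    by_cases h : (ws.length : Int) < m
    · rw [if_pos h, ih]
      have h1 : ws.length < m.toNat := by omega
      have h2 : m.toNat - ws.length = (m.toNat - (ws.length + 1)) + 1 := by omega
      simp [h2, List.take_succ_cons]
      ring
    · rw [if_neg h, ih]
      have h1 : m.toNat - ws.length = 0 := by omega
      simp [h1]
      ring

-- ===== VERDICT (by name: the statement is the Claim_ definition above) =====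
theorem count_words_and_collect_prefix_spec : Claim_equal_count_words_and_collect_prefix := by
  intro corpus max_len _
  unfold Spec_count_words_and_collect_prefix count_words_and_collect_prefix count_words_and_collect_prefix_alt
  rw [cwacp_loop_eq]
  simp
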